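-- pv_equiv track=rewrite | github.com/moonstachain/ai-da-guan-jia | scripts/ccswitch_openrouter_bridge.py | split_toml_root_and_tables
-- ===== SOURCE A (Python) =====
-- def split_toml_root_and_tables(raw: str) -> tuple[str, str]:
--     root_lines: list[str] = []
--     table_lines: list[str] = []
--     in_tables = False
--     for line in raw.splitlines():
--         stripped = line.strip()
--         if stripped.startswith("[") and stripped.endswith("]"):
--             in_tables = True
--         if in_tables:
--             table_lines.append(line)
--         else:
--             root_lines.append(line)
--     root = "\n".join(root_lines).strip()
--     tables = "\n".join(table_lines).strip()
--     return root, tables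
-- ===== SOURCE B (Python) =====
-- def split_toml_root_and_tables(raw: str) -> tuple[str, str]:
--     lines = raw.splitlines()
--     idx = next(
--         (i for i, line in enumerate(lines)
--          if line.strip().startswith("[") and line.strip().endswith("]")),
--         len(lines),
--     )
--     return "\n".join(lines[:idx]).strip(), "\n".join(lines[idx:]).strip()
-- ===== Notes on version B (the rewrite author's own statement) =====
-- stated objective: simpler
-- what changed: B locates the index of the first table-header line (default len(lines)) and slices the line list once, instead of A's latching boolean with two accumulator lists grown line by line.
import Mathlib
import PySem

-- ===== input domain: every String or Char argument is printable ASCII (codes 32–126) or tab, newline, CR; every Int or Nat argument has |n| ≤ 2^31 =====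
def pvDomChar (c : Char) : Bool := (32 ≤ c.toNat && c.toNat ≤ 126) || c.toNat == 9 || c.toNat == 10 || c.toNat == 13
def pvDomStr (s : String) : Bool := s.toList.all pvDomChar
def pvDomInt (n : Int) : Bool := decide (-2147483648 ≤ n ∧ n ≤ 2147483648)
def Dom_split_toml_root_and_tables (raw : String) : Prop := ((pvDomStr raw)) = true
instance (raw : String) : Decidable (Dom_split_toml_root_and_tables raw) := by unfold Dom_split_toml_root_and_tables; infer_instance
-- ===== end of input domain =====

-- B replaces A's latching boolean and two accumulator lists with a single split index
-- (first table-header line, defaulting to the number of lines) and two slices: simpler.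


-- ===== PORT A =====
-- A's loop body: state is (root_lines, table_lines, in_tables)
def pvStepA (st : List String × List String × Bool) (line : String) :
    List String × List String × Bool :=
  let stripped := PySem.Str.strip line
  let in_tables :=
    if PySem.Str.startswith stripped "[" && PySem.Str.endswith stripped "]" then true
    else st.2.2
  if in_tables then (st.1, st.2.1 ++ [line], in_tables)
  else (st.1 ++ [line], st.2.1, in_tables)

def split_toml_root_and_tables (raw : String) : String × String :=
  let st := (PySem.Str.splitlines raw).foldl pvStepA ([], [], false)
  (PySem.Str.strip (PySem.Str.join "\n" st.1),
   PySem.Str.strip (PySem.Str.join "\n" st.2.1))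

-- ===== PORT B =====
-- B's header test: stripped line starts with '[' and ends with ']'
def pvIsHeader (line : String) : Bool :=
  PySem.Str.startswith (PySem.Str.strip line) "[" &&
  PySem.Str.endswith (PySem.Str.strip line) "]"

def split_toml_root_and_tables_alt (raw : String) : String × String :=
  let lines := PySem.Str.splitlines raw
  let idx := lines.findIdx pvIsHeader   -- = len(lines) when no header line exists
  (PySem.Str.strip (PySem.Str.join "\n" (lines.take idx)),
   PySem.Str.strip (PySem.Str.join "\n" (lines.drop idx)))

-- ===== PRECONDITION & SPEC =====
def Spec_split_toml_root_and_tables (raw : String) (out : String × String) : Prop := out = split_toml_root_and_tables_alt raw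
instance (raw : String) (out : String × String) : Decidable (Spec_split_toml_root_and_tables raw out) := by unfold Spec_split_toml_root_and_tables; infer_instance

-- ===== CLAIM (what is proved, stated in full; the proofs are below) =====
def Claim_equal_split_toml_root_and_tables : Prop := ∀ (raw : String), Dom_split_toml_root_and_tables raw → Spec_split_toml_root_and_tables raw (split_toml_root_and_tables raw)

-- ===== LEMMAS AND PROOFS =====

-- once in_tables is true, every remaining line is appended to table_lines
theorem pvFoldA_true (lines : List String) (r t : List String) :
    lines.foldl pvStepA (r, t, true) = (r, t ++ lines, true) := by
  induction lines generalizing t with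
  | nil => simp
  | cons l rest ih =>
      simp only [List.foldl_cons, pvStepA]
      simp [ih, List.append_assoc]

-- A's loop from a still-false state produces the take/drop split at the first header
theorem pvFoldA_false (lines : List String) (r : List String) :
    lines.foldl pvStepA (r, [], false) =
      (r ++ lines.take (lines.findIdx pvIsHeader),
       lines.drop (lines.findIdx pvIsHeader),
       lines.any pvIsHeader) := by
  induction lines generalizing r with
  | nil => simp
  | cons l rest ih =>
      by_cases h : pvIsHeader l
      · have hh : (PySem.Str.startswith (PySem.Str.strip l) "[" &&
            PySem.Str.endswith (PySem.Str.strip l) "]") = true := h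
        simp only [List.foldl_cons, pvStepA, hh, if_true]
        simp [pvFoldA_true, List.findIdx_cons, h]
      · have hh : (PySem.Str.startswith (PySem.Str.strip l) "[" &&
            PySem.Str.endswith (PySem.Str.strip l) "]") = false := by
          simpa [pvIsHeader] using h
        simp only [List.foldl_cons, pvStepA, hh]
        simp only [if_false, Bool.false_eq_true]
        rw [ih]
        simp [List.findIdx_cons, h, List.append_assoc]

-- ===== VERDICT (by name: the statement is the Claim_ definition above) =====
theorem split_toml_root_and_tables_spec : Claim_equal_split_toml_root_and_tables := by
  intro raw _
  unfold Spec_split_toml_root_and_tables split_toml_root_and_tables split_toml_root_and_tables_alt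
  rw [pvFoldA_false]
  simp
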